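-- pv_equiv track=rewrite | github.com/victortarn/Recursive-Binary-Search | A4_1.py | find_first_b
-- ===== SOURCE A (Python) =====
-- def find_first_b(text, i):
--     """Takes a string containing only a's and b's and returns the index
--     of the first b"""
--     length = len(text)
--     if i < length:
--         if text[i] == "b":
--             return i
--         else:
--             return (find_first_b(text, i+1))
--     else:
--         return None
-- ===== SOURCE B (Python) =====
-- def find_first_b(text, i):
--     """Takes a string containing only a's and b's and returns the index
--     of the first b"""
--     for j in range(i, len(text)):
--         if text[j] == "b":
--             return j
--     return None
-- ===== Notes on version B (the rewrite author's own statement) =====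
-- stated objective: idiomatic
-- what changed: Replaced the tail recursion over i with a single iterative range(i, len(text)) scan returning the first matching index.
import Mathlib
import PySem

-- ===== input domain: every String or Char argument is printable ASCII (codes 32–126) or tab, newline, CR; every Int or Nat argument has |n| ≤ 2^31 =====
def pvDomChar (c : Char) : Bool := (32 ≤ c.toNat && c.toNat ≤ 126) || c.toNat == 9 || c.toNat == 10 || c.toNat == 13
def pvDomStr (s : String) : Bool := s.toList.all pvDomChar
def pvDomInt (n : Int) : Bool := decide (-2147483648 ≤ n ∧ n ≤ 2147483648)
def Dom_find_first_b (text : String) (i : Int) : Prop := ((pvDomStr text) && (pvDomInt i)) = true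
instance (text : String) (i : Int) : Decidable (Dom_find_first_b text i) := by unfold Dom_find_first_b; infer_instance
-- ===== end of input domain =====

-- B replaces A's tail recursion by an iterative scan of range(i, len(text)) (idiomatic; same cost).
-- ===== PORT A =====
-- literal transliteration of A's recursion; pyGet? = none means the Python raises IndexError
-- (those inputs are excluded by Pre_ below, where the port returns none)
def find_first_b (text : String) (i : Int) : Option Int :=
  -- length = len(text), inlined
  if h : i < (text.toList.length : Int) then
    match PySem.List.pyGet? text.toList i with
    | some c => if c = 'b' then some i else find_first_b text (i + 1)
    | none => none
  else
    none
termination_by ((text.toList.length : Int) - i).toNat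
decreasing_by simp_wf; simpa using h

-- ===== PORT B =====
-- for j in range(i, len(text)): if text[j] == 'b': return j; return None
def find_first_b_alt (text : String) (i : Int) : Option Int :=
  (PySem.List.pyRange i (text.toList.length : Int) 1).find?
    (fun j => PySem.List.pyGet? text.toList j == some 'b')

-- ===== PRECONDITION & SPEC =====
-- Pre_ excludes i < -len(text): there the Python A raises IndexError (and B does too).
def Pre_find_first_b (text : String) (i : Int) : Prop :=
  -(text.toList.length : Int) ≤ i
instance (text : String) (i : Int) : Decidable (Pre_find_first_b text i) := by
  unfold Pre_find_first_b; infer_instance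

def pvWitness_find_first_b : String × Int := ("abab", -2)

def Spec_find_first_b (text : String) (i : Int) (out : Option Int) : Prop := out = find_first_b_alt text i
instance (text : String) (i : Int) (out : Option Int) : Decidable (Spec_find_first_b text i out) := by unfold Spec_find_first_b; infer_instance

-- ===== CLAIM (what is proved, stated in full; the proofs are below) =====
def Claim_equal_find_first_b : Prop := ∀ (text : String) (i : Int), Dom_find_first_b text i → Pre_find_first_b text i → Spec_find_first_b text i (find_first_b text i)

-- ===== LEMMAS AND PROOFS =====

lemma find_first_b_eq_alt (text : String) :
    ∀ (n : Nat) (i : Int), (((text.toList.length : Int) - i).toNat = n) →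
      -(text.toList.length : Int) ≤ i →
      find_first_b text i = find_first_b_alt text i := by
  intro n
  induction n using Nat.strong_induction_on with
  | _ n ih =>
    intro i hn hpre
    rw [find_first_b]
    by_cases h : i < (text.toList.length : Int)
    · have hget : ∃ c, PySem.List.pyGet? text.toList i = some c := by
        cases hg : PySem.List.pyGet? text.toList i with
        | none =>
          exfalso
          have := (PySem.List.pyGet?_eq_none_iff (xs := text.toList) (i := i)).mp hg
          exact this ⟨by omega, by omega⟩
        | some c => exact ⟨c, rfl⟩
      obtain ⟨c, hc⟩ := hget
      rw [dif_pos h, hc]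
      rw [find_first_b_alt, PySem.List.pyRange_one_cons h, List.find?_cons]
      by_cases hb : c = 'b'
      · simp [hc, hb]
      · have hcond : (PySem.List.pyGet? text.toList i == some 'b') = false := by
          simp [hc, hb]
        rw [hcond]
        simp only [if_neg hb]
        have := ih (((text.toList.length : Int) - (i + 1)).toNat) (by omega) (i + 1) rfl (by omega)
        rw [this, find_first_b_alt]
    · rw [dif_neg h, find_first_b_alt, PySem.List.pyRange_one_eq_nil (by omega)]
      rfl

-- ===== VERDICT (by name: the statement is the Claim_ definition above) =====
theorem find_first_b_spec : Claim_equal_find_first_b := by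
  intro text i _ hpre
  unfold Spec_find_first_b
  exact find_first_b_eq_alt text _ i rfl hpre
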